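-- pv_equiv track=rewrite | github.com/sincerity1129/data_process | pdf_process/controllers/pdf_controller.py | pdf_table_result_label_list
-- ===== SOURCE A (Python) =====
-- from collections import defaultdict
--
-- def pdf_table_result_label_list(label_list):
--     one_label_result_list = []
--     non_label_result_list = []
--     for values in label_list[1:]:
--         tmp_dict = defaultdict(list)
--         for k, v in zip(label_list[0], values):
--             tmp_dict[k].append(v)
--         one_label_result_list.append(tmp_dict)
--
--     for texts in label_list:
--         tmp_dict = {}
--         tmp_dict[texts[0]] = texts[1:]
--         non_label_result_list.append(tmp_dict)
--     labels_keys = list(one_label_result_list[0].keys())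
--     if "," not in labels_keys[1]:
--         return one_label_result_list
--     return non_label_result_list
-- ===== SOURCE B (Python) =====
-- def pdf_table_result_label_list(label_list):
--     header = label_list[0]
--     keys = list(dict(zip(header, label_list[1])).keys())
--     if "," not in keys[1]:
--         return [
--             {k: [v for kk, v in zip(header, row) if kk == k]
--              for k in dict(zip(header, row))}
--             for row in label_list[1:]
--         ]
--     return [{row[0]: row[1:]} for row in label_list]
-- ===== Notes on version B (the rewrite author's own statement) =====
-- stated objective: simpler
-- what changed: B decides the branch first from dict(zip(header, label_list[1])).keys() and builds only the list it returns, grouping each row with a dict comprehension over its zipped pairs, instead of A's two eagerly-built result lists with a per-pair defaultdict insertion loop; Pre_ excludes exactly the inputs where A raises IndexError (fewer than two rows, fewer than two distinct zipped header keys, or an empty row reached by A's eager second list).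
import Mathlib
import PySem

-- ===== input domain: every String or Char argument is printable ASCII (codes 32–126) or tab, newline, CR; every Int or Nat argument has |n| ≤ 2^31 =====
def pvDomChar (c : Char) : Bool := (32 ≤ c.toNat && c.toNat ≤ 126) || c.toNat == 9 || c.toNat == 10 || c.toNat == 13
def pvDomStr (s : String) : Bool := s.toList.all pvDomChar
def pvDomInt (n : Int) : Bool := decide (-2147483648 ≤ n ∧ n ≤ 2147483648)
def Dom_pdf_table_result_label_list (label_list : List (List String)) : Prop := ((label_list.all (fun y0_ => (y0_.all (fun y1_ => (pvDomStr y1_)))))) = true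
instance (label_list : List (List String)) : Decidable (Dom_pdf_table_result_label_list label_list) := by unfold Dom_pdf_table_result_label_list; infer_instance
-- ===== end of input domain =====

-- B decides the branch first from the deduplicated zipped header keys and builds only the
-- list it returns, grouping each row with a dict comprehension, instead of A's two eagerly
-- built lists with a per-pair defaultdict insertion loop; objective: simpler.

-- ===== PORT A =====
-- appending into a dict-of-lists slot: tmp_dict[k].append(v) on defaultdict(list)
def pvDinsert {α : Type} (d : List (String × List α)) (k : String) (v : α) : List (String × List α) :=
  if d.any (fun p => p.1 == k) then
    d.map (fun p => if p.1 == k then (p.1, p.2 ++ [v]) else p)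
  else d ++ [(k, [v])]

def pdf_table_result_label_list (label_list : List (List String)) : List (List (String × List String)) :=
  let one_label_result_list := (label_list.drop 1).map (fun values =>
    ((label_list.headD []).zip values).foldl (fun d p => pvDinsert d p.1 p.2) [])
  let non_label_result_list := label_list.map (fun texts => [(texts.headD "", texts.drop 1)])
  let labels_keys := (one_label_result_list.headD []).map Prod.fst
  -- '"," not in labels_keys[1]': a one-char substring test is exactly char membership
  if ¬ ((labels_keys.getD 1 "").toList.contains ',') then one_label_result_list
  else non_label_result_list

-- ===== PORT B =====
def pdf_table_result_label_list_alt (label_list : List (List String)) : List (List (String × List String)) :=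
  let header := label_list.headD []
  -- keys = list(dict(zip(header, label_list[1])).keys())
  let keys := ((header.zip (label_list.getD 1 [])).foldl
    (fun d p => d.insert p.1 p.2) (PySem.Dict.empty : PySem.Dict String String)).keys
  if ¬ ((keys.getD 1 "").toList.contains ',') then
    (label_list.drop 1).map (fun row =>
      let pairs := header.zip row
      -- {k: [v for kk, v in pairs if kk == k] for k in dict(pairs)}
      ((pairs.foldl (fun d p => d.insert p.1 p.2)
          (PySem.Dict.empty : PySem.Dict String String)).keys).map
        (fun k => (k, (pairs.filter (fun q => q.1 == k)).map Prod.snd)))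
  else
    label_list.map (fun row => [(row.headD "", row.drop 1)])

-- ===== PRECONDITION & SPEC =====
-- Pre_ excludes exactly the inputs where Python A raises IndexError: fewer than two rows,
-- fewer than two distinct zipped header keys (labels_keys[1]), or an empty row (texts[0]).
def Pre_pdf_table_result_label_list (label_list : List (List String)) : Prop :=
  2 ≤ label_list.length ∧ (∀ row ∈ label_list, row ≠ []) ∧
  2 ≤ (((label_list.headD []).take (label_list.getD 1 []).length).dedup).length
instance (label_list : List (List String)) : Decidable (Pre_pdf_table_result_label_list label_list) := by unfold Pre_pdf_table_result_label_list; infer_instance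

def pvWitness_pdf_table_result_label_list : List (List String) :=
  [["name", "age"], ["bob", "7"], ["eve", "9"]]

def Spec_pdf_table_result_label_list (label_list : List (List String)) (out : List (List (String × List String))) : Prop := out = pdf_table_result_label_list_alt label_list
instance (label_list : List (List String)) (out : List (List (String × List String))) : Decidable (Spec_pdf_table_result_label_list label_list out) := by unfold Spec_pdf_table_result_label_list; infer_instance

-- ===== CLAIM (what is proved, stated in full; the proofs are below) =====
def Claim_equal_pdf_table_result_label_list : Prop := ∀ (label_list : List (List String)), Dom_pdf_table_result_label_list label_list → Pre_pdf_table_result_label_list label_list → Spec_pdf_table_result_label_list label_list (pdf_table_result_label_list label_list)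

-- ===== LEMMAS AND PROOFS =====

-- keys not yet seen, in first-occurrence order (dict key order of a pair list)
def pvNewKeys (seen : List String) : List String → List String
  | [] => []
  | k :: ks => if seen.contains k then pvNewKeys seen ks else k :: pvNewKeys (seen ++ [k]) ks

-- entries the dict-of-lists fold appends beyond the keys already present
def pvTail {α : Type} (seen : List String) : List (String × α) → List (String × List α)
  | [] => []
  | (k, v) :: rest =>
    if seen.contains k then pvTail seen rest
    else (k, v :: ((rest.filter (fun p => p.1 == k)).map Prod.snd)) :: pvTail (seen ++ [k]) rest

theorem pvNewKeys_not_mem (l : List String) : ∀ (seen : List String) (k : String),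
    k ∈ pvNewKeys seen l → k ∉ seen := by
  induction l with
  | nil => intro seen k h; simp [pvNewKeys] at h
  | cons x xs ih =>
    intro seen k h
    simp only [pvNewKeys] at h
    split at h
    · exact ih seen k h
    · rcases List.mem_cons.1 h with rfl | h'
      · rename_i hc; simpa using hc
      · have := ih (seen ++ [x]) k h'
        intro hk; exact this (by simp [hk])

theorem pvFoldl_dinsert {α : Type} (pairs : List (String × α)) : ∀ (d : List (String × List α)),
    pairs.foldl (fun d p => pvDinsert d p.1 p.2) d =
      d.map (fun p => (p.1, p.2 ++ (pairs.filter (fun q => q.1 == p.1)).map Prod.snd))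
        ++ pvTail (d.map Prod.fst) pairs := by
  induction pairs with
  | nil => intro d; simp [pvTail]
  | cons pr rest ih =>
    obtain ⟨k, v⟩ := pr
    intro d
    simp only [List.foldl_cons]
    rw [ih]
    by_cases hc : k ∈ d.map Prod.fst
    · have hany : d.any (fun p => p.1 == k) = true := by
        simp only [List.any_eq_true]
        obtain ⟨p, hp, hpk⟩ := List.mem_map.1 hc
        exact ⟨p, hp, by simp [hpk]⟩
      have hins : pvDinsert d k v = d.map (fun p => if p.1 == k then (p.1, p.2 ++ [v]) else p) := by
        simp [pvDinsert, hany]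
      rw [hins]
      have hfst : (d.map (fun p => if p.1 == k then (p.1, p.2 ++ [v]) else p)).map Prod.fst
          = d.map Prod.fst := by
        simp only [List.map_map]; apply List.map_congr_left; intro p _
        by_cases h : p.1 = k <;> simp [h]
      rw [hfst]
      have htail : pvTail (d.map Prod.fst) ((k, v) :: rest) = pvTail (d.map Prod.fst) rest := by
        simp only [pvTail]; rw [if_pos (List.contains_iff_mem.2 hc)]
      rw [htail]
      congr 1
      simp only [List.map_map]
      apply List.map_congr_left; intro p _
      by_cases h : p.1 = k
      · simp [h]
      · simp [h, Ne.symm h]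
    · have hany : d.any (fun p => p.1 == k) = false := by
        simp only [List.any_eq_false]
        intro p hp
        simp only [beq_iff_eq]
        intro hpk; exact hc (List.mem_map.2 ⟨p, hp, hpk⟩)
      have hins : pvDinsert d k v = d ++ [(k, [v])] := by simp [pvDinsert, hany]
      have hncontains : (d.map Prod.fst).contains k = false := by
        rw [Bool.eq_false_iff]
        intro h; exact hc (List.contains_iff_mem.1 h)
      have hfst2 : ((d ++ [(k, [v])]).map Prod.fst) = d.map Prod.fst ++ [k] := by simp
      rw [hins, hfst2]
      have htail : pvTail (d.map Prod.fst) ((k, v) :: rest)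
          = (k, v :: ((rest.filter (fun p => p.1 == k)).map Prod.snd))
            :: pvTail (d.map Prod.fst ++ [k]) rest := by
        simp only [pvTail]
        rw [if_neg (by simp only [hncontains]; exact Bool.false_ne_true)]
      rw [htail]
      have hmap : (d ++ [(k, [v])]).map
            (fun p => (p.1, p.2 ++ (rest.filter (fun q => q.1 == p.1)).map Prod.snd))
          = d.map (fun p => (p.1, p.2 ++ ((((k, v) :: rest).filter (fun q => q.1 == p.1)).map Prod.snd)))
            ++ [(k, v :: (rest.filter (fun q => q.1 == k)).map Prod.snd)] := by
        rw [List.map_append]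
        congr 1
        · apply List.map_congr_left; intro p hp
          have hpk : ¬ p.1 = k := fun h => hc (List.mem_map.2 ⟨p, hp, h⟩)
          simp [Ne.symm hpk]
      rw [hmap]
      simp

theorem pvTail_eq {α : Type} (pairs : List (String × α)) : ∀ (seen : List String),
    pvTail seen pairs = (pvNewKeys seen (pairs.map Prod.fst)).map
      (fun k => (k, (pairs.filter (fun q => q.1 == k)).map Prod.snd)) := by
  induction pairs with
  | nil => intro seen; simp [pvTail, pvNewKeys]
  | cons pr rest ih =>
    obtain ⟨k, v⟩ := pr
    intro seen
    simp only [pvTail, List.map_cons, pvNewKeys]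
    by_cases hc : seen.contains k = true
    · rw [if_pos hc, if_pos hc, ih]
      apply List.map_congr_left
      intro k' hk'
      have hne : ¬ k' = k := by
        intro h; subst h
        exact pvNewKeys_not_mem _ _ _ hk' (List.contains_iff_mem.1 hc)
      simp [Ne.symm hne]
    · rw [if_neg hc, if_neg hc, ih]
      simp only [List.map_cons]
      congr 1
      · simp
      · apply List.map_congr_left
        intro k' hk'
        have hne : ¬ k' = k := by
          intro h; subst h
          exact pvNewKeys_not_mem _ _ _ hk' (by simp)
        simp [Ne.symm hne]

theorem zip_map_fst_take (h : List String) : ∀ (row : List String),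
    (h.zip row).map Prod.fst = h.take row.length := by
  induction h with
  | nil => intro row; simp
  | cons x xs ih =>
    intro row
    cases row with
    | nil => simp
    | cons y ys => simp [List.zip_cons_cons, ih]

-- A's per-row dict fold, characterised over the distinct prefix keys
theorem pvFold_char (h row : List String) :
    ((h.zip row).foldl (fun d p => pvDinsert d p.1 p.2) [])
      = (pvNewKeys [] (h.take row.length)).map
          (fun k => (k, ((h.zip row).filter (fun q => q.1 == k)).map Prod.snd)) := by
  rw [pvFoldl_dinsert]
  simp only [List.map_nil, List.nil_append]
  rw [pvTail_eq, zip_map_fst_take]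

-- keys of a dict built by inserting pairs left to right: first-occurrence order
theorem pvDict_keys_foldl {α : Type} (pairs : List (String × α)) :
    ∀ (d : PySem.Dict String α),
    (pairs.foldl (fun d p => d.insert p.1 p.2) d).keys
      = d.keys ++ pvNewKeys d.keys (pairs.map Prod.fst) := by
  induction pairs with
  | nil => intro d; simp [pvNewKeys]
  | cons pr rest ih =>
    obtain ⟨k, v⟩ := pr
    intro d
    simp only [List.foldl_cons, List.map_cons, pvNewKeys]
    by_cases hc : d.keys.contains k = true
    · have hcd : d.contains k = true :=
        (PySem.Dict.contains_iff_mem_keys d k).2 (List.contains_iff_mem.1 hc)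
      rw [ih, PySem.Dict.keys_insert_of_contains d v hcd, if_pos hc]
    · have hcd : d.contains k = false := by
        rw [Bool.eq_false_iff]; intro h
        exact absurd (List.contains_iff_mem.2 ((PySem.Dict.contains_iff_mem_keys d k).1 h))
          (by simpa using hc)
      rw [ih, PySem.Dict.keys_insert_of_not_contains d v hcd, if_neg hc]
      simp

theorem ports_agree (label_list : List (List String)) :
    pdf_table_result_label_list label_list = pdf_table_result_label_list_alt label_list := by
  unfold pdf_table_result_label_list pdf_table_result_label_list_alt
  cases label_list with
  | nil => decide
  | cons h t =>
    cases t with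
    | nil =>
      simp only [List.drop_succ_cons, List.drop_zero, List.headD_cons, List.map_nil,
        List.headD_nil, List.map_cons, List.getD_cons_succ]
      rw [pvDict_keys_foldl]
      simp [pvNewKeys]
    | cons r1 rest =>
      simp only [List.drop_succ_cons, List.drop_zero, List.headD_cons, List.getD_cons_succ,
        List.getD_cons_zero, List.map_cons, List.headD_cons]
      rw [pvDict_keys_foldl, PySem.Dict.keys_empty, List.nil_append, zip_map_fst_take]
      rw [pvFold_char h r1]
      have hkeys : ((pvNewKeys [] (h.take r1.length)).map
            (fun k => (k, ((h.zip r1).filter (fun q => q.1 == k)).map Prod.snd))).map Prod.fst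
          = pvNewKeys [] (h.take r1.length) := by
        rw [List.map_map]
        exact List.map_id'' (fun _ => rfl) _
      rw [hkeys]
      have hrow : ∀ row : List String,
          ((((h.zip row).foldl (fun d p => d.insert p.1 p.2)
              (PySem.Dict.empty : PySem.Dict String String)).keys).map
            (fun k => (k, ((h.zip row).filter (fun q => q.1 == k)).map Prod.snd)))
          = ((h.zip row).foldl (fun d p => pvDinsert d p.1 p.2) []) := by
        intro row
        rw [pvDict_keys_foldl, PySem.Dict.keys_empty, List.nil_append, zip_map_fst_take,
          pvFold_char]
      simp only [hrow]

-- ===== VERDICT (by name: the statement is the Claim_ definition above) =====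
theorem pdf_table_result_label_list_spec : Claim_equal_pdf_table_result_label_list := by
  intro label_list _ _
  unfold Spec_pdf_table_result_label_list
  exact ports_agree label_list
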